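-- pv_equiv track=rewrite | github.com/byronrthomas/shocknet | misc_scripts/hbs_crises.py | summarise_event_starts
-- ===== SOURCE A (Python) =====
-- def summarise_event_starts(event_occurrences):
--     events_by_type_and_year = {}
--     i = 0
--     for ev in event_occurrences:
--         if ev['type'] not in events_by_type_and_year:
--             events_by_type_and_year[ev['type']] = {}
--         by_type = events_by_type_and_year[ev['type']]
--         if ev['start'] not in by_type:
--             by_type[ev['start']] = i
--             i += 1
--     return events_by_type_and_year
-- ===== SOURCE B (Python) =====
-- def summarise_event_starts(event_occurrences):
--     # Pass 1: assign each distinct (type, start) pair its global first-appearance index.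
--     seen = {}
--     for ev in event_occurrences:
--         pair = (ev['type'], ev['start'])
--         if pair not in seen:
--             seen[pair] = len(seen)
--     # Pass 2: shape the flat index into the nested {type: {start: index}} result.
--     result = {}
--     for (t, s), idx in seen.items():
--         result.setdefault(t, {})[s] = idx
--     return result
-- ===== Notes on version B (the rewrite author's own statement) =====
-- stated objective: alternative
-- what changed: A builds the nested {type: {start: i}} dict and the counter in a single interleaved loop; B first makes one flat pass assigning each distinct (type,start) pair its first-appearance index (idx = len(seen)), then a separate reshaping pass that fills the nested result from that ordered flat index with setdefault.
-- outside the precondition, e.g. on summarise_event_starts([{'type': 'a'}]): A raises KeyError, B raises KeyError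
import Mathlib
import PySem

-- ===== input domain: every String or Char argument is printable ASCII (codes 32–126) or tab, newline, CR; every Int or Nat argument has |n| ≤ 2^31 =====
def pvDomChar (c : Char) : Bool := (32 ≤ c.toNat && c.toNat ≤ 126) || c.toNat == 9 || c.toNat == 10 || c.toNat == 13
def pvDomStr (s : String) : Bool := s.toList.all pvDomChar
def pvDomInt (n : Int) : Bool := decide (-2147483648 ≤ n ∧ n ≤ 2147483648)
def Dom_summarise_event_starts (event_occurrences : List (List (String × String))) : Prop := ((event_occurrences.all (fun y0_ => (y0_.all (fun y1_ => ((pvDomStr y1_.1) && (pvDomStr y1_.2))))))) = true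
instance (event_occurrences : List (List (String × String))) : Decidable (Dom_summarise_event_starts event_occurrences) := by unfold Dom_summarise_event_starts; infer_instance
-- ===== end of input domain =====

-- B replaces A's single interleaved loop by a flat first-pass index of distinct (type,start)
-- pairs plus a separate reshaping pass (objective: alternative decomposition, same cost).

-- ===== PORT A =====
-- ev['type'] / ev['start'] : first-match lookup in the row's association list; the default ""
-- is never reached under Pre_ (Python raises KeyError exactly there).
def pvLook (ev : List (String × String)) (k : String) : String :=
  (((ev.find? (fun p => p.1 == k)).map Prod.snd).getD "")

def pvAStep (st : PySem.Dict String (PySem.Dict String Int) × Int) (ev : List (String × String)) :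
    PySem.Dict String (PySem.Dict String Int) × Int :=
  let t := pvLook ev "type"
  let d := if st.1.contains t then st.1 else st.1.insert t PySem.Dict.empty
  let byType := d.getD t PySem.Dict.empty
  let s := pvLook ev "start"
  if byType.contains s then (d, st.2)
  else (d.insert t (byType.insert s st.2), st.2 + 1)

def summarise_event_starts (event_occurrences : List (List (String × String))) : List (String × List (String × Int)) :=
  let st := event_occurrences.foldl pvAStep (PySem.Dict.empty, (0 : Int))
  st.1.items.map (fun q => (q.1, q.2.items))

-- ===== PORT B =====
def pvBStep (seen : PySem.Dict (String × String) Int) (ev : List (String × String)) :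
    PySem.Dict (String × String) Int :=
  let p := (pvLook ev "type", pvLook ev "start")
  if seen.contains p then seen else seen.insert p (seen.size : Int)

-- result.setdefault(t, {})[s] = idx
def pvFillStep (r : PySem.Dict String (PySem.Dict String Int)) (q : (String × String) × Int) :
    PySem.Dict String (PySem.Dict String Int) :=
  r.insert q.1.1 ((r.getD q.1.1 PySem.Dict.empty).insert q.1.2 q.2)

def summarise_event_starts_alt (event_occurrences : List (List (String × String))) : List (String × List (String × Int)) :=
  let seen := event_occurrences.foldl pvBStep PySem.Dict.empty
  let result := seen.items.foldl pvFillStep PySem.Dict.empty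
  result.items.map (fun q => (q.1, q.2.items))

-- ===== PRECONDITION & SPEC =====
-- Pre_ excludes exactly the rows missing a 'type' or 'start' key, where Python's A raises KeyError.
def Pre_summarise_event_starts (event_occurrences : List (List (String × String))) : Prop :=
  (event_occurrences.all (fun ev => ev.any (fun p => p.1 == "type") && ev.any (fun p => p.1 == "start"))) = true
instance (event_occurrences : List (List (String × String))) : Decidable (Pre_summarise_event_starts event_occurrences) := by unfold Pre_summarise_event_starts; infer_instance

def pvWitness_summarise_event_starts : (List (List (String × String))) :=
  [[("type", "flood"), ("start", "1990")], [("type", "flood"), ("start", "1991")], [("type", "fire"), ("start", "1990")]]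

def Spec_summarise_event_starts (event_occurrences : List (List (String × String))) (out : List (String × List (String × Int))) : Prop := out = summarise_event_starts_alt event_occurrences
instance (event_occurrences : List (List (String × String))) (out : List (String × List (String × Int))) : Decidable (Spec_summarise_event_starts event_occurrences out) := by unfold Spec_summarise_event_starts; infer_instance

-- ===== CLAIM (what is proved, stated in full; the proofs are below) =====
def Claim_equal_summarise_event_starts : Prop := ∀ (event_occurrences : List (List (String × String))), Dom_summarise_event_starts event_occurrences → Pre_summarise_event_starts event_occurrences → Spec_summarise_event_starts event_occurrences (summarise_event_starts event_occurrences)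

-- ===== LEMMAS AND PROOFS =====

-- the nested dict B's second pass builds from a flat pair-index list
def pvFill (l : List ((String × String) × Int)) : PySem.Dict String (PySem.Dict String Int) :=
  l.foldl pvFillStep PySem.Dict.empty

-- membership of s in the inner dict at t of the filled result = membership of the pair (t,s) in the flat list
lemma pvFill_inner_contains (l : List ((String × String) × Int))
    (r : PySem.Dict String (PySem.Dict String Int)) (t s : String) :
    ((l.foldl pvFillStep r).getD t PySem.Dict.empty).contains s
      = (l.any (fun q => q.1 == (t, s)) || (r.getD t PySem.Dict.empty).contains s) := by
  induction l generalizing r with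
  | nil => simp
  | cons q l ih =>
    simp only [List.foldl_cons, List.any_cons, ih]
    by_cases ht : t = q.1.1
    · subst ht
      rw [pvFillStep, PySem.Dict.getD_insert_self, PySem.Dict.contains_insert]
      by_cases hs : s = q.1.2
      · subst hs; simp
      · have h1 : (s == q.1.2) = false := beq_eq_false_iff_ne.mpr hs
        have h2 : (q.1 == (q.1.1, s)) = false :=
          beq_eq_false_iff_ne.mpr (fun h => hs ((congrArg Prod.snd h).symm))
        simp [h1, h2]
    · rw [pvFillStep, PySem.Dict.getD_insert_of_ne _ _ _ ht]
      have h2 : (q.1 == (t, s)) = false :=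
        beq_eq_false_iff_ne.mpr (fun h => ht ((congrArg Prod.fst h).symm))
      simp [h2]

lemma pvContains_of_inner (d : PySem.Dict String (PySem.Dict String Int)) (t s : String)
    (h : (d.getD t PySem.Dict.empty).contains s = true) : d.contains t = true := by
  by_cases hc : d.contains t = true
  · exact hc
  · rw [PySem.Dict.getD_of_not_contains _ _ (by simpa using hc)] at h
    simp [PySem.Dict.contains_empty] at h

-- seen.contains p as a scan over its items
lemma pvDict_contains_any {ν : Type} (d : PySem.Dict (String × String) ν) (p : String × String) :
    d.contains p = d.items.any (fun q => q.1 == p) := by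
  rw [PySem.Dict.contains_eq_decide_mem_keys]
  simp only [PySem.Dict.keys]
  rw [Bool.eq_iff_iff]
  simp only [decide_eq_true_eq, List.any_eq_true, List.mem_map, beq_iff_eq]

-- main loop invariant: A's running state is exactly B's flat index, reshaped, with its size as counter
lemma pvMain (l : List (List (String × String))) (seen : PySem.Dict (String × String) Int) :
    l.foldl pvAStep (pvFill seen.items, (seen.size : Int))
      = (pvFill (l.foldl pvBStep seen).items, ((l.foldl pvBStep seen).size : Int)) := by
  induction l generalizing seen with
  | nil => rfl
  | cons ev l ih =>
    simp only [List.foldl_cons]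
    set t := pvLook ev "type" with hT
    set s := pvLook ev "start" with hS
    by_cases hc : seen.contains (t, s) = true
    · -- the pair was already indexed: both steps are no-ops
      have hinner : ((pvFill seen.items).getD t PySem.Dict.empty).contains s = true := by
        rw [pvFill, pvFill_inner_contains]
        rw [pvDict_contains_any] at hc
        simp only [hc, Bool.true_or]
      have houter : (pvFill seen.items).contains t = true := pvContains_of_inner _ _ _ hinner
      have hA : pvAStep (pvFill seen.items, (seen.size : Int)) ev = (pvFill seen.items, (seen.size : Int)) := by
        simp [pvAStep, ← hT, ← hS, houter, hinner]
      have hB : pvBStep seen ev = seen := by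
        simp [pvBStep, ← hT, ← hS, hc]
      rw [hA, hB]; exact ih seen
    · -- a new pair: A records it under (t, s) with counter i; B appends it to the flat index
      have hcf : seen.contains (t, s) = false := by simpa using hc
      have hinner : ((pvFill seen.items).getD t PySem.Dict.empty).contains s = false := by
        rw [pvFill, pvFill_inner_contains]
        rw [pvDict_contains_any] at hcf
        simp [hcf, PySem.Dict.getD_empty, PySem.Dict.contains_empty]
      have hB : pvBStep seen ev = seen.insert (t, s) (seen.size : Int) := by
        simp [pvBStep, ← hT, ← hS, hcf]
      have hitems : (seen.insert (t, s) (seen.size : Int)).items = seen.items ++ [((t, s), (seen.size : Int))] :=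
        PySem.Dict.items_insert_of_not_contains _ _ hcf
      have hfill : pvFill (seen.insert (t, s) (seen.size : Int)).items
          = (pvFill seen.items).insert t (((pvFill seen.items).getD t PySem.Dict.empty).insert s (seen.size : Int)) := by
        rw [pvFill, hitems, List.foldl_append]
        rfl
      have hsize : ((seen.insert (t, s) (seen.size : Int)).size : Int) = (seen.size : Int) + 1 := by
        rw [PySem.Dict.size_insert]
        simp [hcf]
      have hA : pvAStep (pvFill seen.items, (seen.size : Int)) ev
          = (pvFill (seen.insert (t, s) (seen.size : Int)).items, ((seen.insert (t, s) (seen.size : Int)).size : Int)) := by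
        rw [hfill, hsize]
        by_cases houter : (pvFill seen.items).contains t = true
        · simp [pvAStep, ← hT, ← hS, houter, hinner]
        · have hof : (pvFill seen.items).contains t = false := by simpa using houter
          simp [pvAStep, ← hT, ← hS, hof, PySem.Dict.getD_insert_self,
                PySem.Dict.insert_insert_self, PySem.Dict.getD_of_not_contains _ _ hof]
      rw [hA, hB]; exact ih (seen.insert (t, s) (seen.size : Int))

-- ===== VERDICT (by name: the statement is the Claim_ definition above) =====
theorem summarise_event_starts_spec : Claim_equal_summarise_event_starts := by
  intro eos _ _
  unfold Spec_summarise_event_starts summarise_event_starts summarise_event_starts_alt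
  have h := pvMain eos PySem.Dict.empty
  have h0 : pvFill (PySem.Dict.empty : PySem.Dict (String × String) Int).items = PySem.Dict.empty := rfl
  rw [h0] at h
  simp only [PySem.Dict.size_empty, Nat.cast_zero] at h
  rw [h]
  rfl
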